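-- pv_equiv track=rewrite | github.com/SantiagoFly/Ai_Camp | Backend/function_app.py | transform_transcription
-- ===== SOURCE A (Python) =====
-- def transform_transcription(transcription: str):
--     # Eliminar espacios en blanco y dividir por "x" para obtener los números
--     numbers = transcription.replace(" ", "").replace("X", "x").split("x")
--
--     # Filtrar elementos vacíos que puedan resultar del proceso anterior
--     numbers = list(filter(None, numbers))
--
--     # Limpiar caracteres no numéricos y convertir los elementos a enteros
--     cleaned_numbers = []
--     all_three_digits = True # Asumimos que todos los números tienen 3 dígitos
--     for num in numbers:
--         # Eliminar todos los caracteres no numéricos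
--         cleaned_num = ''.join(filter(str.isdigit, num))
--         if cleaned_num:  # Asegurarse de que no esté vacío
--             if len(cleaned_num) != 3:
--                 all_three_digits = False  # Encontrar un número que no tenga tres cifras
--             cleaned_numbers.append(int(cleaned_num))
--
--
--     # Agrupar los números en pares
--     pairs_of_three_digits = []
--     is_even = True  # Asumimos que la cantidad de números es par inicialment
--     for i in range(0, len(cleaned_numbers), 2):
--         if i+1 < len(cleaned_numbers):
--             pair = [cleaned_numbers[i], cleaned_numbers[i+1]]
--             pairs_of_three_digits.append(pair)
--
--         else:
--             # Si nos quedamos con un número suelto, cambiamos la bandera a False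
--             pairs_of_three_digits.append([cleaned_numbers[i]])
--             is_even = False  # Hay un número sin par
--     return pairs_of_three_digits, is_even, all_three_digits
-- ===== SOURCE B (Python) =====
-- def _chunk2(nums):
--     # group a list into successive pairs, a trailing element staying alone
--     if len(nums) <= 2:
--         return [nums] if nums else []
--     return [nums[:2]] + _chunk2(nums[2:])
--
--
-- def transform_transcription(transcription: str):
--     # tokenize once: split on "x", keep only the digit characters, drop empties
--     parts = transcription.replace(" ", "").replace("X", "x").split("x")
--     tokens = [t for t in (''.join(filter(str.isdigit, p)) for p in parts) if t]
--     nums = [int(t) for t in tokens]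
--     return _chunk2(nums), len(nums) % 2 == 0, all(len(t) == 3 for t in tokens)
-- ===== Notes on version B (the rewrite author's own statement) =====
-- stated objective: simpler
-- what changed: A's two stateful loops (a flag-and-append accumulator loop, then an index loop over range(0,len,2) with an is_even flag) are replaced by a single tokenize-once pipeline: comprehensions build the token and number lists, the two flags become closed-form aggregates (all(len==3), len%2==0), and the pairing is a small recursion on the list instead of index arithmetic.
import Mathlib
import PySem

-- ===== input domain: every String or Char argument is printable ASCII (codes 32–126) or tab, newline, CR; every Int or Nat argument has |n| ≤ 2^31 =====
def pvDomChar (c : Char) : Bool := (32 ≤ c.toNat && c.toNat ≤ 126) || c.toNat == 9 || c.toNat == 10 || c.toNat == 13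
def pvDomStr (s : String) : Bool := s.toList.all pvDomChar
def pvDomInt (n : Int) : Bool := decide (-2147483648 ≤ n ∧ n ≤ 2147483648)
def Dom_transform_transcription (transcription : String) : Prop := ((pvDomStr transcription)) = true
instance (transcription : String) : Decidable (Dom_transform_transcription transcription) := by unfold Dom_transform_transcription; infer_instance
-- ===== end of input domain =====

-- B replaces A's two stateful flag-carrying loops by a tokenize-once pipeline with
-- closed-form aggregates and a small recursion for the pairing (objective: simpler).

-- ===== PORT A =====
-- body of A's first for-loop (cleaning + all_three_digits flag)
def pvStepA (st : List Int × Bool) (num : List Char) : List Int × Bool :=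
  let cleaned_num := num.filter PySem.Chars.isdigit
  if cleaned_num.isEmpty then st
  else (st.1 ++ [(PySem.Int.ofChars? cleaned_num).getD 0],  -- int(cleaned_num); exact: cleaned_num is a nonempty digit string
        if cleaned_num.length ≠ 3 then false else st.2)

-- body of A's second for-loop (pairing + is_even flag)
def pvStepP (cleaned : List Int) (pq : List (List Int) × Bool) (i : Int) : List (List Int) × Bool :=
  if i + 1 < (cleaned.length : Int) then
    (pq.1 ++ [[PySem.List.pyGetD cleaned i 0, PySem.List.pyGetD cleaned (i + 1) 0]], pq.2)
  else
    (pq.1 ++ [[PySem.List.pyGetD cleaned i 0]], false)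

def transform_transcription (transcription : String) : List (List Int) × Bool × Bool :=
  let numbers := PySem.Chars.splitOn
      (PySem.Chars.replace (PySem.Chars.replace transcription.toList [' '] []) ['X'] ['x']) ['x']
  let numbers := numbers.filter (fun n => !n.isEmpty)      -- list(filter(None, numbers))
  let st := numbers.foldl pvStepA ([], true)
  let res := (PySem.List.pyRange 0 (st.1.length : Int) 2).foldl (pvStepP st.1) ([], true)
  (res.1, res.2, st.2)

-- ===== PORT B =====
-- B helper _chunk2: successive pairs, trailing element alone
def pvChunk2 : List Int → List (List Int)
  | [] => []
  | [a] => [[a]]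
  | a :: b :: rest => [a, b] :: pvChunk2 rest

def transform_transcription_alt (transcription : String) : List (List Int) × Bool × Bool :=
  let parts := PySem.Chars.splitOn
      (PySem.Chars.replace (PySem.Chars.replace transcription.toList [' '] []) ['X'] ['x']) ['x']
  let tokens := (parts.map (fun p => p.filter PySem.Chars.isdigit)).filter (fun t => !t.isEmpty)
  let nums := tokens.map (fun t => (PySem.Int.ofChars? t).getD 0)  -- int(t); exact: t is a nonempty digit string
  (pvChunk2 nums, decide (nums.length % 2 = 0), tokens.all (fun t => t.length == 3))

-- ===== PRECONDITION & SPEC =====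
def Spec_transform_transcription (transcription : String) (out : List (List Int) × Bool × Bool) : Prop := out = transform_transcription_alt transcription
instance (transcription : String) (out : List (List Int) × Bool × Bool) : Decidable (Spec_transform_transcription transcription out) := by unfold Spec_transform_transcription; infer_instance

-- ===== CLAIM (what is proved, stated in full; the proofs are below) =====
def Claim_equal_transform_transcription : Prop := ∀ (transcription : String), Dom_transform_transcription transcription → Spec_transform_transcription transcription (transform_transcription transcription)

-- ===== LEMMAS AND PROOFS =====

-- A's first loop (over the pre-filtered parts) computes B's token pipeline.
theorem pv_loopA (ps : List (List Char)) : ∀ (c : List Int) (f : Bool),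
    (ps.filter (fun n => !n.isEmpty)).foldl pvStepA (c, f)
    = (c ++ ((ps.map (fun p => p.filter PySem.Chars.isdigit)).filter (fun t => !t.isEmpty)).map
          (fun t => (PySem.Int.ofChars? t).getD 0),
       f && ((ps.map (fun p => p.filter PySem.Chars.isdigit)).filter (fun t => !t.isEmpty)).all
          (fun t => t.length == 3)) := by
  induction ps with
  | nil => simp
  | cons p ps ih =>
    intro c f
    by_cases hp : p.isEmpty
    · have hpe : p = [] := by cases p <;> simp_all
      subst hpe; simpa using ih c f
    · have h1 : (p :: ps).filter (fun n => !n.isEmpty) = p :: ps.filter (fun n => !n.isEmpty) := by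
        simp [hp]
      by_cases hc : (p.filter PySem.Chars.isdigit).isEmpty
      · have h2 : ((p :: ps).map (fun p => p.filter PySem.Chars.isdigit)).filter (fun t => !t.isEmpty)
            = (ps.map (fun p => p.filter PySem.Chars.isdigit)).filter (fun t => !t.isEmpty) := by
          simp [hc]
        have hstep : pvStepA (c, f) p = (c, f) := by simp [pvStepA, hc]
        rw [h1, List.foldl_cons, hstep, h2, ih]
      · have h2 : ((p :: ps).map (fun p => p.filter PySem.Chars.isdigit)).filter (fun t => !t.isEmpty)
            = p.filter PySem.Chars.isdigit
              :: (ps.map (fun p => p.filter PySem.Chars.isdigit)).filter (fun t => !t.isEmpty) := by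
          simp [hc]
        have hstep : pvStepA (c, f) p
            = (c ++ [(PySem.Int.ofChars? (p.filter PySem.Chars.isdigit)).getD 0],
               if (p.filter PySem.Chars.isdigit).length ≠ 3 then false else f) := by
          simp [pvStepA, hc]
        rw [h1, List.foldl_cons, hstep, h2, ih]
        simp only [List.map_cons, List.all_cons, Prod.mk.injEq]
        constructor
        · simp
        · by_cases h3 : (p.filter PySem.Chars.isdigit).length = 3 <;> simp [h3]

-- range(0, n, 2) in closed form
theorem pv_range_two (n : Nat) :
    PySem.List.pyRange 0 (n : Int) 2 = (List.range ((n + 1) / 2)).map (fun k : Nat => 2 * (k : Int)) := by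
  rw [PySem.List.pyRange_of_pos 0 (n : Int) (by norm_num)]
  rcases Nat.eq_zero_or_pos n with h | h
  · subst h; simp
  · have hlt : (0 : Int) < (n : Int) := by exact_mod_cast h
    rw [if_pos hlt]
    have : ((n : Int) - 0 + 2 - 1) / 2 = (((n + 1) / 2 : Nat) : Int) := by
      push_cast; omega
    rw [this, Int.toNat_natCast]
    simp

-- shifting A's pairing step past two consumed elements
theorem pv_step_shift (a b : Int) (rest : List Int) (m : Nat) (s : List (List Int) × Bool) :
    (List.range m).foldl (fun s (k : Nat) => pvStepP (a :: b :: rest) s (2 * ((k : Int) + 1))) s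
    = (List.range m).foldl (fun s (k : Nat) => pvStepP rest s (2 * (k : Int))) s := by
  apply PySem.List.foldl_congr_mem
  intro acc k _
  have h2 : (2 * ((k : Int) + 1)) = 2 * (k : Int) + 2 := by ring
  rw [h2]
  simp only [pvStepP, List.length_cons]
  have hg1 : PySem.List.pyGetD (a :: b :: rest) (2 * (k : Int) + 2) 0
      = PySem.List.pyGetD rest (2 * (k : Int)) 0 := by
    rw [PySem.List.pyGetD_of_nonneg _ _ (by positivity),
        PySem.List.pyGetD_of_nonneg _ _ (by positivity)]
    have h : (2 * (k : Int) + 2).toNat = (2 * (k : Int)).toNat + 2 := by omega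
    simp [h]
  have hg2 : PySem.List.pyGetD (a :: b :: rest) (2 * (k : Int) + 2 + 1) 0
      = PySem.List.pyGetD rest (2 * (k : Int) + 1) 0 := by
    rw [PySem.List.pyGetD_of_nonneg _ _ (by positivity),
        PySem.List.pyGetD_of_nonneg _ _ (by positivity)]
    have h : (2 * (k : Int) + 2 + 1).toNat = (2 * (k : Int) + 1).toNat + 2 := by omega
    simp [h]
  by_cases hcond : (2 * (k : Int) + 1 < ((rest.length : Nat) : Int))
  · rw [if_pos (by push_cast; omega), if_pos hcond, hg1, hg2]
  · rw [if_neg (by push_cast; omega), if_neg hcond, hg1]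

-- A's pairing loop over range(0, len, 2) computes pvChunk2 and the parity flag.
theorem pv_loopP (nums : List Int) : ∀ (P : List (List Int)) (e : Bool),
    ((List.range ((nums.length + 1) / 2)).map (fun k : Nat => 2 * (k : Int))).foldl (pvStepP nums) (P, e)
    = (P ++ pvChunk2 nums, e && decide (nums.length % 2 = 0)) := by
  induction nums using pvChunk2.induct with
  | case1 => intro P e; simp [pvChunk2]
  | case2 a =>
    intro P e
    simp only [List.length_cons, List.length_nil]
    norm_num [List.range_succ, pvStepP, pvChunk2]
  | case3 a b rest ih =>
    intro P e
    have hlen : ((a :: b :: rest).length + 1) / 2 = (rest.length + 1) / 2 + 1 := by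
      simp only [List.length_cons]; omega
    rw [hlen, List.range_succ_eq_map, List.map_cons, List.foldl_cons]
    have hstep0 : pvStepP (a :: b :: rest) (P, e) (2 * ((0 : Nat) : Int)) = (P ++ [[a, b]], e) := by
      simp only [Nat.cast_zero, mul_zero, pvStepP]
      rw [if_pos (by simp only [List.length_cons]; push_cast; omega)]
      simp [PySem.List.pyGetD_of_nonneg]
    rw [hstep0]
    simp only [List.map_map, List.foldl_map, Function.comp,
      Nat.succ_eq_add_one, Nat.cast_add, Nat.cast_one]
    rw [pv_step_shift]
    have := ih (P ++ [[a, b]]) e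
    simp only [List.foldl_map] at this
    rw [this]
    have hmod : (rest.length + 1 + 1) % 2 = rest.length % 2 := by omega
    simp [pvChunk2, hmod]

-- ===== VERDICT (by name: the statement is the Claim_ definition above) =====
theorem transform_transcription_spec : Claim_equal_transform_transcription := by
  intro t _
  unfold Spec_transform_transcription transform_transcription transform_transcription_alt
  simp only []
  rw [pv_loopA, pv_range_two]
  simp only [List.nil_append, Bool.true_and]
  rw [pv_loopP]
  simp
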